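-- pv_equiv track=rewrite | github.com/mamtomtn2111/TransportProblemProject | TPprograming.py | ongkosMinimum
-- ===== SOURCE A (Python) =====
-- def ongkosMinimum(s,d, sTot, dTot, terkecil,supply ,demand):
-- 	table=[]
-- 	for x in range(s):
-- 		temp=[]
-- 		for y in range(d):
-- 			temp.append(0)
-- 		table.append(temp)
-- 	toAllocate(table,0, sTot, dTot, terkecil,supply, demand)
-- 	return table
--
-- def toAllocate(table2,i, sTot, dTot, terkecil,supply, demand):
-- 	if sTot==0 and dTot==0:
-- 		return table2
-- 	x=terkecil[i][1]
-- 	y=terkecil[i][2]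
-- 	if supply[x]<demand[y]:
-- 		table2[x][y]=supply[x]
-- 		demand[y]-=supply[x]
-- 		supply[x]=0
-- 		sTot=sum(supply)
-- 		dTot=sum(demand)
-- 		toAllocate(table2,i+1, sTot, dTot, terkecil,supply, demand)
-- 	elif supply[x]>demand[y]:
-- 		table2[x][y]=demand[y]
-- 		supply[x]-=demand[y]
-- 		demand[y]=0
-- 		sTot=sum(supply)
-- 		dTot=sum(demand)
-- 		toAllocate(table2,i+1, sTot, dTot, terkecil,supply, demand)
-- 	elif supply[x]==demand[y]:
-- 		table2[x][y]=supply[x]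
-- 		supply[x]=0
-- 		demand[y]=0
-- 		sTot=sum(supply)
-- 		dTot=sum(demand)
-- 		toAllocate(table2,i+1, sTot, dTot, terkecil,supply, demand)
-- ===== SOURCE B (Python) =====
-- def ongkosMinimum(s, d, sTot, dTot, terkecil, supply, demand):
--     # Iterative single-rule allocation: walk the cost-sorted cell list once,
--     # allocating min(supply, demand) at each cell; mutates supply/demand in
--     # place exactly like the original.
--     table = [[0] * d for _ in range(s)]
--     for row in terkecil:
--         if sTot == 0 and dTot == 0:
--             break
--         x, y = row[1], row[2]
--         m = min(supply[x], demand[y])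
--         table[x][y] = m
--         supply[x] -= m
--         demand[y] -= m
--         sTot = sum(supply)
--         dTot = sum(demand)
--     return table
-- ===== Notes on version B (the rewrite author's own statement) =====
-- stated objective: simpler
-- what changed: Replaced the index-counting tail-recursive helper with its three explicit allocation branches by a single iterative pass over the cell list that allocates min(supply[x], demand[y]) at each cell, breaking when both totals are zero.
-- outside the precondition, e.g. on ongkosMinimum(1, 1, 1, 1, [[5, -1, -1]], [1], [1]): A returns [[1]], B returns [[1]]
import Mathlib
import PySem

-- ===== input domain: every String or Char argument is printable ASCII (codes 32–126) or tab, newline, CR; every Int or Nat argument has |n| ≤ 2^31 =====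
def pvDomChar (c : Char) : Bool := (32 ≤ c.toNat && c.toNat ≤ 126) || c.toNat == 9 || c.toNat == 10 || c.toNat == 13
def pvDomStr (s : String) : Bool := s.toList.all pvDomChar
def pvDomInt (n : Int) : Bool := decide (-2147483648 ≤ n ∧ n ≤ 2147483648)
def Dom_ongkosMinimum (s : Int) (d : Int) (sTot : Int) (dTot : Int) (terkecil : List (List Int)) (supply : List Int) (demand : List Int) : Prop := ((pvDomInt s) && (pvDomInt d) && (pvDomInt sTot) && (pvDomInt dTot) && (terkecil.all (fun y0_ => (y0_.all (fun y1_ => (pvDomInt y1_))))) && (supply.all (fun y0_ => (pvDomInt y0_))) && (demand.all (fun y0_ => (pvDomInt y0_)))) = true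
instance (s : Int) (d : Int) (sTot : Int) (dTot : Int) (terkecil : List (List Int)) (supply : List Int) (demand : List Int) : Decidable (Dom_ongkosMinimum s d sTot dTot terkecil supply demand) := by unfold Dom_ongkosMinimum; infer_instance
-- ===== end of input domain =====

-- B replaces A's index-counting tail recursion (three explicit allocation branches) by a
-- single pass over the cell list allocating min(supply[x], demand[y]) per cell; like A it
-- mutates the supply/demand arguments in place (same mutations wherever A returns).

-- Shared write primitive for both ports: table2[x][y] = v (Python semantics, incl. negative wrap).
def pvSet2 (table : List (List Int)) (x y v : Int) : List (List Int) :=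
  PySem.List.pySetD table x (PySem.List.pySetD (PySem.List.pyGetD table x []) y v)

-- ===== PORT A =====
-- toAllocate: fuel (= terkecil.length + 1, enough for every input Pre_ admits; the
-- fuel-out / bad-index results are junk values reached only where the Python raises).
def pvAllocA : Nat → List (List Int) → Int → Int → Int → List (List Int) → List Int → List Int → List (List Int)
  | 0, table, _, _, _, _, _, _ => table
  | fuel + 1, table, i, sTot, dTot, terkecil, supply, demand =>
    if sTot = 0 ∧ dTot = 0 then table
    else match PySem.List.pyGet? terkecil i with
    | none => table   -- Python raises IndexError here; junk value outside Pre_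
    | some row =>
      let x := PySem.List.pyGetD row 1 0
      let y := PySem.List.pyGetD row 2 0
        let sx := PySem.List.pyGetD supply x 0
        let dy := PySem.List.pyGetD demand y 0
        if sx < dy then
          let table2 := pvSet2 table x y sx
          let demand2 := PySem.List.pySetD demand y (dy - sx)
          let supply2 := PySem.List.pySetD supply x 0
          pvAllocA fuel table2 (i + 1) supply2.sum demand2.sum terkecil supply2 demand2
        else if sx > dy then
          let table2 := pvSet2 table x y dy
          let supply2 := PySem.List.pySetD supply x (sx - dy)
          let demand2 := PySem.List.pySetD demand y 0
          pvAllocA fuel table2 (i + 1) supply2.sum demand2.sum terkecil supply2 demand2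
        else -- supply[x] == demand[y] (the three comparisons are exhaustive)
          let table2 := pvSet2 table x y sx
          let supply2 := PySem.List.pySetD supply x 0
          let demand2 := PySem.List.pySetD demand y 0
          pvAllocA fuel table2 (i + 1) supply2.sum demand2.sum terkecil supply2 demand2

def ongkosMinimum (s : Int) (d : Int) (sTot : Int) (dTot : Int) (terkecil : List (List Int)) (supply : List Int) (demand : List Int) : List (List Int) :=
  let table := (PySem.List.pyRange 0 s 1).foldl
    (fun tb _ => tb ++ [(PySem.List.pyRange 0 d 1).foldl (fun t _ => t ++ [(0 : Int)]) []]) []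
  pvAllocA (terkecil.length + 1) table 0 sTot dTot terkecil supply demand

-- ===== PORT B =====
def pvLoopB : List (List Int) → List (List Int) → Int → Int → List Int → List Int → List (List Int)
  | [], table, _, _, _, _ => table
  | row :: rest, table, sTot, dTot, supply, demand =>
    if sTot = 0 ∧ dTot = 0 then table
    else
      let x := PySem.List.pyGetD row 1 0
    let y := PySem.List.pyGetD row 2 0
      let m := min (PySem.List.pyGetD supply x 0) (PySem.List.pyGetD demand y 0)
      let table2 := pvSet2 table x y m
      let supply2 := PySem.List.pySetD supply x (PySem.List.pyGetD supply x 0 - m)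
      let demand2 := PySem.List.pySetD demand y (PySem.List.pyGetD demand y 0 - m)
      pvLoopB rest table2 supply2.sum demand2.sum supply2 demand2

def ongkosMinimum_alt (s : Int) (d : Int) (sTot : Int) (dTot : Int) (terkecil : List (List Int)) (supply : List Int) (demand : List Int) : List (List Int) :=
  pvLoopB terkecil (List.replicate s.toNat (List.replicate d.toNat 0)) sTot dTot supply demand

-- ===== PRECONDITION & SPEC =====
-- Pre_ narrows to the natural transportation domain (immediate-return inputs, or: matching
-- lengths, nonnegative balanced supply/demand with correct totals, and a cell list whose
-- rows carry in-range coordinates covering every cell): A's exact no-IndexError domain has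
-- no closed form, and outside this natural domain A almost always raises; on the rare
-- excluded inputs where A still returns (e.g. negative wrapped indices) B returns the same.
def Pre_ongkosMinimum (s : Int) (d : Int) (sTot : Int) (dTot : Int) (terkecil : List (List Int)) (supply : List Int) (demand : List Int) : Prop :=
  (sTot = 0 ∧ dTot = 0) ∨
  ((supply.length : Int) = s ∧ (demand.length : Int) = d ∧
   (∀ v ∈ supply, 0 ≤ v) ∧ (∀ w ∈ demand, 0 ≤ w) ∧
   sTot = supply.sum ∧ dTot = demand.sum ∧ supply.sum = demand.sum ∧
   (∀ row ∈ terkecil, 3 ≤ row.length ∧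
      0 ≤ PySem.List.pyGetD row 1 0 ∧ PySem.List.pyGetD row 1 0 < s ∧
      0 ≤ PySem.List.pyGetD row 2 0 ∧ PySem.List.pyGetD row 2 0 < d) ∧
   (∀ x ∈ PySem.List.pyRange 0 s 1, ∀ y ∈ PySem.List.pyRange 0 d 1,
      ∃ row ∈ terkecil, PySem.List.pyGetD row 1 0 = x ∧ PySem.List.pyGetD row 2 0 = y))
instance (s : Int) (d : Int) (sTot : Int) (dTot : Int) (terkecil : List (List Int)) (supply : List Int) (demand : List Int) : Decidable (Pre_ongkosMinimum s d sTot dTot terkecil supply demand) := by unfold Pre_ongkosMinimum; infer_instance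

def pvWitness_ongkosMinimum : Int × Int × Int × Int × List (List Int) × List Int × List Int :=
  (2, 2, 5, 5, [[1, 0, 1], [2, 1, 0], [3, 0, 0], [4, 1, 1]], [3, 2], [1, 4])

def Spec_ongkosMinimum (s : Int) (d : Int) (sTot : Int) (dTot : Int) (terkecil : List (List Int)) (supply : List Int) (demand : List Int) (out : List (List Int)) : Prop := out = ongkosMinimum_alt s d sTot dTot terkecil supply demand
instance (s : Int) (d : Int) (sTot : Int) (dTot : Int) (terkecil : List (List Int)) (supply : List Int) (demand : List Int) (out : List (List Int)) : Decidable (Spec_ongkosMinimum s d sTot dTot terkecil supply demand out) := by unfold Spec_ongkosMinimum; infer_instance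

-- ===== CLAIM (what is proved, stated in full; the proofs are below) =====
def Claim_equal_ongkosMinimum : Prop := ∀ (s : Int) (d : Int) (sTot : Int) (dTot : Int) (terkecil : List (List Int)) (supply : List Int) (demand : List Int), Dom_ongkosMinimum s d sTot dTot terkecil supply demand → Pre_ongkosMinimum s d sTot dTot terkecil supply demand → Spec_ongkosMinimum s d sTot dTot terkecil supply demand (ongkosMinimum s d sTot dTot terkecil supply demand)

-- ===== LEMMAS AND PROOFS =====

-- Appending one fixed element per loop turn builds a replicate.
lemma pv_foldl_append_replicate {α β : Type} (c : α) (l : List β) (acc : List α) :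
    (l.foldl (fun t _ => t ++ [c]) acc) = acc ++ List.replicate l.length c := by
  induction l generalizing acc with
  | nil => simp
  | cons h t ih =>
    rw [List.foldl_cons, ih, List.length_cons]
    simp [List.replicate_succ]

lemma pv_build_table (s d : Int) :
    ((PySem.List.pyRange 0 s 1).foldl
      (fun tb _ => tb ++ [(PySem.List.pyRange 0 d 1).foldl (fun t _ => t ++ [(0 : Int)]) []]) [])
    = List.replicate s.toNat (List.replicate d.toNat 0) := by
  rw [pv_foldl_append_replicate ((PySem.List.pyRange 0 d 1).foldl (fun t _ => t ++ [(0 : Int)]) [])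
        (PySem.List.pyRange 0 s 1) [],
      pv_foldl_append_replicate (0 : Int) (PySem.List.pyRange 0 d 1) []]
  simp [PySem.List.length_pyRange_one]

-- One-step unfolding of pvAllocA (stops the simplifier from unfolding the recursive call).
lemma pvAllocA_succ (fuel : Nat) (table : List (List Int)) (i sTot dTot : Int)
    (terkecil : List (List Int)) (supply demand : List Int) :
    pvAllocA (fuel + 1) table i sTot dTot terkecil supply demand =
      if sTot = 0 ∧ dTot = 0 then table
      else match PySem.List.pyGet? terkecil i with
      | none => table
      | some row =>
        let x := PySem.List.pyGetD row 1 0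
        let y := PySem.List.pyGetD row 2 0
        let sx := PySem.List.pyGetD supply x 0
        let dy := PySem.List.pyGetD demand y 0
        if sx < dy then
          pvAllocA fuel (pvSet2 table x y sx) (i + 1)
            (PySem.List.pySetD supply x 0).sum (PySem.List.pySetD demand y (dy - sx)).sum
            terkecil (PySem.List.pySetD supply x 0) (PySem.List.pySetD demand y (dy - sx))
        else if sx > dy then
          pvAllocA fuel (pvSet2 table x y dy) (i + 1)
            (PySem.List.pySetD supply x (sx - dy)).sum (PySem.List.pySetD demand y 0).sum
            terkecil (PySem.List.pySetD supply x (sx - dy)) (PySem.List.pySetD demand y 0)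
        else
          pvAllocA fuel (pvSet2 table x y sx) (i + 1)
            (PySem.List.pySetD supply x 0).sum (PySem.List.pySetD demand y 0).sum
            terkecil (PySem.List.pySetD supply x 0) (PySem.List.pySetD demand y 0) := rfl

-- The two loops agree step for step: A at index (pre.length) into pre ++ suf with fuel
-- suf.length + 1 is B's structural recursion on suf.
lemma pv_alloc_eq (suf : List (List Int)) : ∀ (pre : List (List Int))
    (table : List (List Int)) (sTot dTot : Int) (supply demand : List Int),
    pvAllocA (suf.length + 1) table ((pre.length : Int)) sTot dTot (pre ++ suf) supply demand
      = pvLoopB suf table sTot dTot supply demand := by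
  induction suf with
  | nil =>
    intro pre table sTot dTot supply demand
    simp only [pvAllocA, pvLoopB, List.length_nil]
    split
    · rfl
    · have h : PySem.List.pyGet? (pre ++ ([] : List (List Int))) ((pre.length : Int)) = none := by
        simp [PySem.List.pyGet?_natCast]
      rw [h]
  | cons row rest ih =>
    intro pre table sTot dTot supply demand
    rw [List.length_cons, pvAllocA_succ, PySem.List.pyGet?_append_length]
    by_cases hz : sTot = 0 ∧ dTot = 0
    · simp [pvLoopB, hz]
    · have hassoc : pre ++ row :: rest = (pre ++ [row]) ++ rest := by simp
      have hlen : (pre.length : Int) + 1 = (((pre ++ [row]).length : Int)) := by simp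
      simp only [pvLoopB, if_neg hz]
      rcases lt_trichotomy (PySem.List.pyGetD supply (PySem.List.pyGetD row 1 0) 0)
          (PySem.List.pyGetD demand (PySem.List.pyGetD row 2 0) 0) with hlt | heq | hgt
      · rw [if_pos hlt, min_eq_left (le_of_lt hlt), hassoc, hlen, sub_self, ih]
      · rw [if_neg (by omega : ¬ _), if_neg (by omega : ¬ _), heq, min_self, hassoc, hlen,
          sub_self, ih]
      · rw [if_neg (not_lt.mpr (le_of_lt hgt)), if_pos hgt, min_eq_right (le_of_lt hgt),
          hassoc, hlen, sub_self, ih]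

-- ===== VERDICT (by name: the statement is the Claim_ definition above) =====
theorem ongkosMinimum_spec : Claim_equal_ongkosMinimum := by
  intro s d sTot dTot terkecil supply demand _ _
  unfold Spec_ongkosMinimum ongkosMinimum ongkosMinimum_alt
  rw [pv_build_table]
  simpa using pv_alloc_eq terkecil [] _ sTot dTot supply demand
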